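-- pv_equiv track=rewrite | github.com/olivertren/advent-of-code | 2023/day2.py | possible_game
-- ===== SOURCE A (Python) =====
-- def possible_game(cubes_list):
--     for game_cubes in cubes_list:
--         for cubes in game_cubes:
--             if cubes.get("red", 0) > 12:
--                 return False
--             if cubes.get("green", 0) > 13:
--                 return False
--             if cubes.get("blue", 0) > 14:
--                 return False
--     return True
-- ===== SOURCE B (Python) =====
-- def possible_game(cubes_list):
--     flat = [cubes for game_cubes in cubes_list for cubes in game_cubes]
--     max_red = max((c.get("red", 0) for c in flat), default=0)
--     max_green = max((c.get("green", 0) for c in flat), default=0)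
--     max_blue = max((c.get("blue", 0) for c in flat), default=0)
--     return max_red <= 12 and max_green <= 13 and max_blue <= 14
-- ===== Notes on version B (the rewrite author's own statement) =====
-- stated objective: alternative
-- what changed: A short-circuits with early returns inside nested loops per cube; B flattens all cubes once, aggregates the per-color maxima with max(..., default=0), and compares the three maxima to the limits in a single final boolean.
import Mathlib
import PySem

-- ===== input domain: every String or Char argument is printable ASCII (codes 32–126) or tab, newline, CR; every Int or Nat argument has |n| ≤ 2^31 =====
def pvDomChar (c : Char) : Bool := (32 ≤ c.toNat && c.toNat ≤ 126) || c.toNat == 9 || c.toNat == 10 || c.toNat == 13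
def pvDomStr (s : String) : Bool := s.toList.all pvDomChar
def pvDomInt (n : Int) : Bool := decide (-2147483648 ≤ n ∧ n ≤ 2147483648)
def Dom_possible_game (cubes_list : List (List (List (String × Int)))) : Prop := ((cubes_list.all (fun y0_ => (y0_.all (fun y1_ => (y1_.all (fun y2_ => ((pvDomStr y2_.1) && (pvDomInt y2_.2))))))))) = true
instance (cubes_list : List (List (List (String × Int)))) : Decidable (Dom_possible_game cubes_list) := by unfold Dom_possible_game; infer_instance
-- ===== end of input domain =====

-- B changes the decomposition: instead of A's nested loops with early returns per cube,
-- B flattens the cubes once, aggregates the per-color maxima, and compares them to the limits.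

-- shared helper: Python's cubes.get(color, 0) (first-match lookup with default 0)
def pvGet (c : List (String × Int)) (k : String) : Int := (PySem.Dict.mk c).getD k 0

-- ===== PORT A =====
-- inner loop over one game's cube draws; an early return propagates as 'false'
def pgGame (game : List (List (String × Int))) : Bool :=
  match game with
  | [] => true
  | c :: rest =>
    if pvGet c "red" > 12 then false
    else if pvGet c "green" > 13 then false
    else if pvGet c "blue" > 14 then false
    else pgGame rest

def possible_game (cubes_list : List (List (List (String × Int)))) : Bool :=
  match cubes_list with
  | [] => true
  | g :: rest => if pgGame g then possible_game rest else false

-- ===== PORT B =====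
-- Python's max(xs, default=0)
def pvMaxD0 (xs : List Int) : Int :=
  match xs with
  | [] => 0
  | x :: rest => rest.foldl max x

def possible_game_alt (cubes_list : List (List (List (String × Int)))) : Bool :=
  let flat := cubes_list.flatMap id
  let max_red := pvMaxD0 (flat.map (fun c => pvGet c "red"))
  let max_green := pvMaxD0 (flat.map (fun c => pvGet c "green"))
  let max_blue := pvMaxD0 (flat.map (fun c => pvGet c "blue"))
  decide (max_red ≤ 12) && decide (max_green ≤ 13) && decide (max_blue ≤ 14)

-- ===== PRECONDITION & SPEC =====
def Spec_possible_game (cubes_list : List (List (List (String × Int)))) (out : Bool) : Prop := out = possible_game_alt cubes_list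
instance (cubes_list : List (List (List (String × Int)))) (out : Bool) : Decidable (Spec_possible_game cubes_list out) := by unfold Spec_possible_game; infer_instance

-- ===== CLAIM (what is proved, stated in full; the proofs are below) =====
def Claim_equal_possible_game : Prop := ∀ (cubes_list : List (List (List (String × Int)))), Dom_possible_game cubes_list → Spec_possible_game cubes_list (possible_game cubes_list)

-- ===== LEMMAS AND PROOFS =====

theorem pgGame_true_iff (g : List (List (String × Int))) :
    pgGame g = true ↔ ∀ c ∈ g, pvGet c "red" ≤ 12 ∧ pvGet c "green" ≤ 13 ∧ pvGet c "blue" ≤ 14 := by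
  induction g with
  | nil => simp [pgGame]
  | cons c rest ih =>
    simp only [pgGame, List.mem_cons]
    split_ifs with h1 h2 h3
    · constructor
      · intro h; exact absurd h (by simp)
      · intro h; exact absurd (h c (Or.inl rfl)).1 (by omega)
    · constructor
      · intro h; exact absurd h (by simp)
      · intro h; exact absurd (h c (Or.inl rfl)).2.1 (by omega)
    · constructor
      · intro h; exact absurd h (by simp)
      · intro h; exact absurd (h c (Or.inl rfl)).2.2 (by omega)
    · rw [ih]
      constructor
      · rintro h x (rfl | hx)
        · exact ⟨by omega, by omega, by omega⟩
        · exact h x hx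
      · intro h x hx; exact h x (Or.inr hx)

theorem possible_game_true_iff (cl : List (List (List (String × Int)))) :
    possible_game cl = true ↔ ∀ g ∈ cl, pgGame g = true := by
  induction cl with
  | nil => simp [possible_game]
  | cons g rest ih =>
    simp only [possible_game, List.mem_cons]
    split_ifs with h
    · rw [ih]
      constructor
      · rintro hr x (rfl | hx); exact h; exact hr x hx
      · intro hr x hx; exact hr x (Or.inr hx)
    · constructor
      · intro hc; exact absurd hc (by simp)
      · intro hc; exact absurd (hc g (Or.inl rfl)) h

theorem foldl_max_le_iff (xs : List Int) (a b : Int) :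
    xs.foldl max a ≤ b ↔ a ≤ b ∧ ∀ x ∈ xs, x ≤ b := by
  induction xs generalizing a with
  | nil => simp
  | cons x rest ih =>
    simp only [List.foldl_cons, List.mem_cons, ih]
    constructor
    · rintro ⟨hm, hr⟩
      refine ⟨le_trans (le_max_left a x) hm, ?_⟩
      rintro y (rfl | hy)
      · exact le_trans (le_max_right a y) hm
      · exact hr y hy
    · rintro ⟨ha, hr⟩
      exact ⟨max_le ha (hr x (Or.inl rfl)), fun y hy => hr y (Or.inr hy)⟩

theorem pvMaxD0_le_iff (xs : List Int) (b : Int) (hb : 0 ≤ b) :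
    pvMaxD0 xs ≤ b ↔ ∀ x ∈ xs, x ≤ b := by
  cases xs with
  | nil => simpa [pvMaxD0]
  | cons x rest =>
    simp only [pvMaxD0, List.mem_cons, foldl_max_le_iff]
    constructor
    · rintro ⟨hx, hr⟩ y (rfl | hy); exact hx; exact hr y hy
    · intro h; exact ⟨h x (Or.inl rfl), fun y hy => h y (Or.inr hy)⟩

-- ===== VERDICT (by name: the statement is the Claim_ definition above) =====
theorem possible_game_spec : Claim_equal_possible_game := by
  intro cl _
  unfold Spec_possible_game
  rw [Bool.eq_iff_iff, possible_game_true_iff]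
  simp only [possible_game_alt, Bool.and_eq_true, decide_eq_true_eq,
    pvMaxD0_le_iff _ _ (by omega : (0:Int) ≤ 12),
    pvMaxD0_le_iff _ _ (by omega : (0:Int) ≤ 13),
    pvMaxD0_le_iff _ _ (by omega : (0:Int) ≤ 14),
    List.mem_map, List.mem_flatMap, id, and_assoc]
  constructor
  · intro h
    refine ⟨?_, ?_, ?_⟩ <;>
      (rintro x ⟨c, ⟨g, hg, hc⟩, rfl⟩; have := (pgGame_true_iff g).1 (h g hg) c hc; omega)
  · rintro ⟨h1, h2, h3⟩ g hg
    rw [pgGame_true_iff]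
    intro c hc
    exact ⟨h1 _ ⟨c, ⟨g, hg, hc⟩, rfl⟩, h2 _ ⟨c, ⟨g, hg, hc⟩, rfl⟩, h3 _ ⟨c, ⟨g, hg, hc⟩, rfl⟩⟩
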